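-- pv_equiv track=rewrite | github.com/CLLKazan/iCQA | qa-engine/forum/utils/userlinking.py | find_best_match_in_name
-- ===== SOURCE A (Python) =====
-- def find_best_match_in_name(content,  uname,  fullname,  start_index):
--     end_index = start_index + len(fullname)
--
--     while end_index > start_index:
--         if content[start_index : end_index].lower() == fullname.lower():
--             return content[start_index : end_index]
--
--         while len(fullname) and fullname[-1] != ' ':
--             fullname = fullname[:-1]
--
--         fullname = fullname.rstrip()
--         end_index = start_index + len(fullname)
--
--     return uname
-- ===== SOURCE B (Python) =====
-- def find_best_match_in_name(content, uname, fullname, start_index):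
--     low = fullname.lower()
--     # One forward scan: ascending word-boundary cut lengths (length of each
--     # whitespace-rstripped prefix that is followed by a space), then the full length.
--     cuts = []
--     last_end = 0  # length of the prefix up to the last non-whitespace char seen
--     for i, ch in enumerate(fullname):
--         if ch == ' ' and last_end > 0 and (not cuts or cuts[-1] != last_end):
--             cuts.append(last_end)
--         if not ch.isspace():
--             last_end = i + 1
--     if fullname:
--         cuts.append(len(fullname))
--     # Try candidates longest first.
--     for k in reversed(cuts):
--         cand = content[start_index : start_index + k]
--         if cand.lower() == low[:k]:
--             return cand
--     return uname
-- ===== Notes on version B (the rewrite author's own statement) =====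
-- stated objective: faster
-- what changed: A repeatedly rebuilds fullname by chopping one character at a time (fullname = fullname[:-1]) and re-lowercases it before each retry; B lowercases fullname once, collects all word-boundary cut lengths in a single forward scan, and then tries the cuts longest-first against slices of content.
import Mathlib
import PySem

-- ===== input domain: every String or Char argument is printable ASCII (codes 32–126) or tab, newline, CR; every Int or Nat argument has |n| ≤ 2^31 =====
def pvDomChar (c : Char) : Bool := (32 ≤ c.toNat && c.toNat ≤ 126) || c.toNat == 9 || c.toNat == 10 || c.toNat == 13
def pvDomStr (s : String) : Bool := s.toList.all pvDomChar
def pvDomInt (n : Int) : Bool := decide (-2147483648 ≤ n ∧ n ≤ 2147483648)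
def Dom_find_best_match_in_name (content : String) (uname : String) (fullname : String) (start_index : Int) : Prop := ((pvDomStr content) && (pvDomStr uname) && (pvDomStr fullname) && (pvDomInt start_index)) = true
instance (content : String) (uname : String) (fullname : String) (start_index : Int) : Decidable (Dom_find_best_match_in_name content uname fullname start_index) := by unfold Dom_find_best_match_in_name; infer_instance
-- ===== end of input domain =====

-- B re-implements A's chop-and-retry over string copies as ONE forward scan collecting the
-- word-boundary cut lengths, then a longest-first candidate loop; same return value everywhere.

-- ===== PORT A =====
-- inner loop: while len(fullname) and fullname[-1] != ' ': fullname = fullname[:-1]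
def pvChopA (f : List Char) : List Char :=
  if h : f = [] then f
  else if f.getLast h ≠ ' ' then pvChopA f.dropLast
  else f
termination_by f.length
decreasing_by
  simp only [List.length_dropLast]
  have : f.length ≠ 0 := fun h0 => h (List.length_eq_zero_iff.mp h0)
  omega

theorem pv_rstrip_concat_space (p : List Char) :
    PySem.Chars.rstrip (p ++ [' ']) = PySem.Chars.rstrip p := by
  simp [PySem.Chars.rstrip, show PySem.Chars.isspace ' ' = true from rfl]

-- termination of A's outer loop: the chopped-and-rstripped fullname is strictly shorter
theorem pvNextA_lt_aux (n : Nat) : ∀ f : List Char, f.length ≤ n → f ≠ [] →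
    (PySem.Chars.rstrip (pvChopA f)).length < f.length := by
  induction n with
  | zero =>
    intro f hn h
    exact absurd (List.length_eq_zero_iff.mp (Nat.le_zero.mp hn)) h
  | succ n ih =>
    intro f hn h
    rw [pvChopA]
    simp only [h, dite_false]
    by_cases hl : f.getLast h = ' '
    · simp only [hl, ne_eq, not_true_eq_false, if_false]
      conv_lhs => rw [← List.dropLast_append_getLast h, hl]
      rw [pv_rstrip_concat_space]
      have h1 := List.length_dropWhile_le PySem.Chars.isspace f.dropLast.reverse
      have h2 : f.length ≠ 0 := fun h0 => h (List.length_eq_zero_iff.mp h0)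
      simp only [PySem.Chars.rstrip, List.length_reverse, List.length_dropLast] at *
      omega
    · simp only [hl, ne_eq, not_false_eq_true, if_true]
      by_cases hd : f.dropLast = []
      · rw [hd]
        rw [pvChopA]
        simp only [dite_true, PySem.Chars.rstrip, List.reverse_nil, List.dropWhile_nil,
          List.length_nil]
        exact List.length_pos_of_ne_nil h
      · have hlen : f.length ≠ 0 := fun h0 => h (List.length_eq_zero_iff.mp h0)
        have hlt : f.dropLast.length < f.length := by
          simp only [List.length_dropLast]; omega
        exact lt_trans (ih f.dropLast (by simp only [List.length_dropLast]; omega) hd) hlt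

theorem pvNextA_lt (f : List Char) (h : f ≠ []) :
    (PySem.Chars.rstrip (pvChopA f)).length < f.length :=
  pvNextA_lt_aux f.length f (le_refl _) h

-- outer loop of A
def pvLoopA (content : List Char) (uname : String) (fullname : List Char) (start_index : Int) : String :=
  if start_index + (fullname.length : Int) > start_index then
    if PySem.Chars.lower (PySem.List.slice content (some start_index) (some (start_index + (fullname.length : Int)))) = PySem.Chars.lower fullname then
      String.ofList (PySem.List.slice content (some start_index) (some (start_index + (fullname.length : Int))))
    else
      pvLoopA content uname (PySem.Chars.rstrip (pvChopA fullname)) start_index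
  else uname
termination_by fullname.length
decreasing_by
  refine pvNextA_lt fullname ?_
  rintro rfl
  simp_all

def find_best_match_in_name (content : String) (uname : String) (fullname : String) (start_index : Int) : String :=
  pvLoopA content.toList uname fullname.toList start_index

-- ===== PORT B =====
-- one forward scan over enumerate(fullname): collect ascending word-boundary cut lengths
def pvScanB (i : Nat) (cuts : List Nat) (lastEnd : Nat) : List Char → List Nat × Nat
  | [] => (cuts, lastEnd)
  | ch :: rest =>
    let cuts' := if ch = ' ' ∧ 0 < lastEnd ∧ cuts.getLast? ≠ some lastEnd then cuts ++ [lastEnd] else cuts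
    let lastEnd' := if PySem.Chars.isspace ch then lastEnd else i + 1
    pvScanB (i + 1) cuts' lastEnd' rest

-- candidate loop: try cuts longest first, return first case-insensitive match
def pvTryB (content : List Char) (low : List Char) (start_index : Int) : List Nat → Option (List Char)
  | [] => none
  | k :: rest =>
    let cand := PySem.List.slice content (some start_index) (some (start_index + (k : Int)))
    if PySem.Chars.lower cand = low.take k then some cand
    else pvTryB content low start_index rest

def find_best_match_in_name_alt (content : String) (uname : String) (fullname : String) (start_index : Int) : String :=
  let low := PySem.Chars.lower fullname.toList
  let sc := pvScanB 0 [] 0 fullname.toList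
  let cuts := if fullname.toList ≠ [] then sc.1 ++ [fullname.toList.length] else sc.1
  match pvTryB content.toList low start_index cuts.reverse with
  | some cand => String.ofList cand
  | none => uname

-- ===== PRECONDITION & SPEC =====
def Spec_find_best_match_in_name (content : String) (uname : String) (fullname : String) (start_index : Int) (out : String) : Prop := out = find_best_match_in_name_alt content uname fullname start_index
instance (content : String) (uname : String) (fullname : String) (start_index : Int) (out : String) : Decidable (Spec_find_best_match_in_name content uname fullname start_index out) := by unfold Spec_find_best_match_in_name; infer_instance

-- ===== CLAIM (what is proved, stated in full; the proofs are below) =====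
def Claim_equal_find_best_match_in_name : Prop := ∀ (content : String) (uname : String) (fullname : String) (start_index : Int), Dom_find_best_match_in_name content uname fullname start_index → Spec_find_best_match_in_name content uname fullname start_index (find_best_match_in_name content uname fullname start_index)

-- ===== LEMMAS AND PROOFS =====

-- A's next fullname, and B's full candidate-cut list, as proof-side names
def pvNextF (f : List Char) : List Char := PySem.Chars.rstrip (pvChopA f)
def pvCutsAll (f : List Char) : List Nat :=
  if f ≠ [] then (pvScanB 0 [] 0 f).1 ++ [f.length] else (pvScanB 0 [] 0 f).1

theorem pvScanB_append (x y : List Char) (i : Nat) (c : List Nat) (le : Nat) :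
    pvScanB i c le (x ++ y) = pvScanB (i + x.length) (pvScanB i c le x).1 (pvScanB i c le x).2 y := by
  induction x generalizing i c le with
  | nil => simp [pvScanB]
  | cons ch rest ih =>
    simp only [List.cons_append, pvScanB, ih, List.length_cons]
    ring_nf

theorem pvScanB_nospace (t : List Char) (i : Nat) (c : List Nat) (le : Nat)
    (h : ∀ ch ∈ t, ch ≠ ' ') : (pvScanB i c le t).1 = c := by
  induction t generalizing i c le with
  | nil => rfl
  | cons ch rest ih =>
    simp only [pvScanB]
    have hch : ch ≠ ' ' := h ch (by simp)
    simp only [hch, false_and, if_false]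
    exact ih _ _ _ (fun x hx => h x (by simp [hx]))

theorem pvScanB_ws (w : List Char) (i : Nat) (c : List Nat) (le : Nat)
    (h : ∀ ch ∈ w, PySem.Chars.isspace ch = true) :
    pvScanB i c le w =
      (if ' ' ∈ w ∧ 0 < le ∧ c.getLast? ≠ some le then c ++ [le] else c, le) := by
  induction w generalizing i c with
  | nil => simp [pvScanB]
  | cons ch rest ih =>
    have hws : PySem.Chars.isspace ch = true := h ch (by simp)
    have hrest : ∀ x ∈ rest, PySem.Chars.isspace x = true := fun x hx => h x (by simp [hx])
    simp only [pvScanB, hws, if_true]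
    rw [ih _ _ hrest]
    by_cases hc : ch = ' ' ∧ 0 < le ∧ c.getLast? ≠ some le
    · rw [if_pos hc, if_neg (by simp),
        if_pos ⟨by simp [hc.1], hc.2⟩]
    · rw [if_neg hc]
      by_cases hr : ' ' ∈ rest ∧ 0 < le ∧ c.getLast? ≠ some le
      · rw [if_pos hr, if_pos ⟨by simp [hr.1], hr.2⟩]
      · rw [if_neg hr, if_neg (by
          intro hx
          rcases List.mem_cons.mp hx.1 with h1 | h1
          · exact hc ⟨h1.symm, hx.2⟩
          · exact hr ⟨h1, hx.2⟩)]

theorem pv_rstrip_cons (ch : Char) (rest : List Char) :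
    PySem.Chars.rstrip (ch :: rest) =
      if PySem.Chars.rstrip rest = [] then (if PySem.Chars.isspace ch then [] else [ch])
      else ch :: PySem.Chars.rstrip rest := by
  simp only [PySem.Chars.rstrip, List.reverse_cons, List.dropWhile_append]
  by_cases he : (List.dropWhile PySem.Chars.isspace rest.reverse) = []
  · simp [he, List.dropWhile]
    by_cases hws : PySem.Chars.isspace ch <;> simp [hws]
  · simp [he, List.isEmpty_iff, List.reverse_eq_nil_iff]

theorem pvScanB_lastEnd (p : List Char) (i : Nat) (c : List Nat) (le : Nat) :
    (pvScanB i c le p).2 =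
      if (PySem.Chars.rstrip p).length = 0 then le else i + (PySem.Chars.rstrip p).length := by
  induction p generalizing i c le with
  | nil => simp [pvScanB, PySem.Chars.rstrip]
  | cons ch rest ih =>
    simp only [pvScanB, ih, pv_rstrip_cons]
    by_cases he : PySem.Chars.rstrip rest = [] <;>
      by_cases hws : PySem.Chars.isspace ch <;>
        simp [he, hws, List.length_eq_zero_iff] <;> omega

theorem pvScanB_bound (q : List Char) (i : Nat) (c : List Nat) (le : Nat) (B : Nat)
    (hle : le ≤ i) (hc : ∀ k ∈ c, k < B) (hB : i + q.length ≤ B) :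
    ∀ k ∈ (pvScanB i c le q).1, k < B := by
  induction q generalizing i c le with
  | nil => exact hc
  | cons ch rest ih =>
    simp only [pvScanB]
    apply ih
    · by_cases hws : PySem.Chars.isspace ch <;> simp [hws]; omega
    · intro k hk
      by_cases hcond : ch = ' ' ∧ 0 < le ∧ c.getLast? ≠ some le
      · rw [if_pos hcond] at hk
        rcases List.mem_append.mp hk with hk | hk
        · exact hc k hk
        · simp only [List.mem_singleton] at hk
          subst hk; simp only [List.length_cons] at hB; omega
      · rw [if_neg hcond] at hk; exact hc k hk
    · simp only [List.length_cons] at hB ⊢; omega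

theorem pv_rstrip_decomp (p : List Char) :
    ∃ w, p = PySem.Chars.rstrip p ++ w ∧ ∀ ch ∈ w, PySem.Chars.isspace ch = true := by
  refine ⟨(p.reverse.takeWhile PySem.Chars.isspace).reverse, ?_, ?_⟩
  · simp only [PySem.Chars.rstrip]
    rw [← List.reverse_append, List.takeWhile_append_dropWhile, List.reverse_reverse]
  · intro ch hch
    exact List.mem_takeWhile_imp (List.mem_reverse.mp hch)

theorem pv_dropWhile_head_false {α : Type} (p : α → Bool) (l : List α) (a : α) (t : List α)
    (hd : List.dropWhile p l = a :: t) : p a = false := by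
  induction l with
  | nil => simp [List.dropWhile] at hd
  | cons x xs ih =>
    rw [List.dropWhile_cons] at hd
    by_cases hx : p x = true
    · exact ih (by simpa [hx] using hd)
    · simp only [hx, Bool.false_eq_true, if_false] at hd
      cases hd
      simpa using hx

theorem pv_rstrip_idem (p : List Char) :
    PySem.Chars.rstrip (PySem.Chars.rstrip p) = PySem.Chars.rstrip p := by
  simp only [PySem.Chars.rstrip, List.reverse_reverse]
  congr 1
  cases hd : List.dropWhile PySem.Chars.isspace p.reverse with
  | nil => simp
  | cons a t =>
    have ha := pv_dropWhile_head_false PySem.Chars.isspace p.reverse a t hd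
    simp [ha]

theorem pv_split_last_space (f : List Char) (h : ' ' ∈ f) :
    ∃ p t, f = p ++ ' ' :: t ∧ ' ' ∉ t := by
  induction f using List.reverseRecOn with
  | nil => simp at h
  | append_singleton l c ih =>
    by_cases hc : c = ' '
    · exact ⟨l, [], by simp [hc], by simp⟩
    · have hl : ' ' ∈ l := by
        rcases List.mem_append.mp h with h1 | h1
        · exact h1
        · simp at h1; exact absurd h1.symm hc
      obtain ⟨p, t, hpt, hnt⟩ := ih hl
      exact ⟨p, t ++ [c], by simp [hpt], by
        intro hmem
        rcases List.mem_append.mp hmem with h1 | h1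
        · exact hnt h1
        · simp at h1; exact hc h1.symm⟩

theorem pvChopA_nospace (f : List Char) (h : ' ' ∉ f) : pvChopA f = [] := by
  induction f using List.reverseRecOn with
  | nil => rw [pvChopA]; simp
  | append_singleton l c ih =>
    rw [pvChopA]
    have hne : l ++ [c] ≠ [] := by simp
    simp only [hne, dite_false]
    have hc : c ≠ ' ' := fun hc => h (by simp [hc])
    rw [List.getLast_append_singleton]
    simp only [hc, ne_eq, not_false_eq_true, if_true, List.dropLast_concat]
    exact ih (fun hm => h (List.mem_append_left _ hm))

theorem pvChopA_last_space (p t : List Char) (h : ' ' ∉ t) :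
    pvChopA (p ++ ' ' :: t) = p ++ [' '] := by
  induction t using List.reverseRecOn with
  | nil =>
    rw [pvChopA]
    have hne : p ++ [' '] ≠ [] := by simp
    simp only [hne, dite_false]
    rw [List.getLast_append_singleton]
    simp
  | append_singleton l c ih =>
    have hc : c ≠ ' ' := fun hc => h (by simp [hc])
    have hrw : p ++ ' ' :: (l ++ [c]) = (p ++ ' ' :: l) ++ [c] := by simp
    rw [hrw, pvChopA]
    have hne : (p ++ ' ' :: l) ++ [c] ≠ [] := by simp
    simp only [hne, dite_false]
    rw [List.getLast_append_singleton]
    simp only [hc, ne_eq, not_false_eq_true, if_true, List.dropLast_concat]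
    exact ih (fun hm => h (List.mem_append_left _ hm))

-- getLast? of the scanned cuts never equals the bound
theorem pv_getLast?_ne_of_lt (c : List Nat) (m : Nat) (h : ∀ k ∈ c, k < m) :
    c.getLast? ≠ some m := by
  intro hl
  exact absurd (h m (List.mem_of_mem_getLast? hl)) (lt_irrefl m)

-- S1: B's cut list of f is |f| on top of B's cut list of A's next fullname
theorem pv_cuts_step (f : List Char) :
    (pvScanB 0 [] 0 f).1 = pvCutsAll (pvNextF f) := by
  by_cases hsp : ' ' ∈ f
  · obtain ⟨p, t, hpt, hnt⟩ := pv_split_last_space f hsp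
    have hchop : pvChopA f = p ++ [' '] := hpt ▸ pvChopA_last_space p t hnt
    have hnext : pvNextF f = PySem.Chars.rstrip p := by
      rw [pvNextF, hchop, pv_rstrip_concat_space]
    obtain ⟨w, hw, hwws⟩ := pv_rstrip_decomp p
    set q := PySem.Chars.rstrip p with hq
    have hfdec : f = q ++ ((w ++ [' ']) ++ t) := by
      rw [hpt, hw]; simp
    have hCq : ∀ k ∈ (pvScanB 0 [] 0 q).1, k < q.length :=
      pvScanB_bound q 0 [] 0 q.length (le_refl 0) (by simp) (by simp)
    have hleq : (pvScanB 0 [] 0 q).2 = q.length := by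
      rw [pvScanB_lastEnd, hq, pv_rstrip_idem]
      by_cases h0 : (PySem.Chars.rstrip p).length = 0 <;> simp [h0]
    have hwsall : ∀ ch ∈ w ++ [' '], PySem.Chars.isspace ch = true := by
      intro ch hch
      rcases List.mem_append.mp hch with h1 | h1
      · exact hwws ch h1
      · simp at h1; subst h1; rfl
    have hmem : ' ' ∈ w ++ [' '] := by simp
    have hL : (pvScanB 0 [] 0 f).1 =
        if 0 < q.length then (pvScanB 0 [] 0 q).1 ++ [q.length] else (pvScanB 0 [] 0 q).1 := by
      conv_lhs => rw [hfdec]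
      rw [pvScanB_append q ((w ++ [' ']) ++ t) 0 [] 0,
        pvScanB_append (w ++ [' ']) t _ _ _, hleq,
        pvScanB_ws (w ++ [' ']) _ _ _ hwsall]
      simp only
      rw [pvScanB_nospace t _ _ _ (fun ch hch hc => hnt (hc ▸ hch))]
      by_cases hq0 : 0 < q.length
      · rw [if_pos ⟨hmem, hq0, pv_getLast?_ne_of_lt _ _ hCq⟩, if_pos hq0]
      · rw [if_neg (fun hx => hq0 hx.2.1), if_neg hq0]
    rw [hL, hnext, pvCutsAll]
    by_cases hq0 : q = []
    · simp [hq0]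
    · simp [hq0, List.length_pos_of_ne_nil hq0]
  · rw [pvScanB_nospace f 0 [] 0 (fun ch hch hc => hsp (hc ▸ hch))]
    rw [pvNextF, pvChopA_nospace f hsp]
    simp [PySem.Chars.rstrip, pvCutsAll, pvScanB]

theorem pvCutsAll_le (f : List Char) : ∀ k ∈ pvCutsAll f, k ≤ f.length := by
  intro k hk
  rw [pvCutsAll] at hk
  by_cases hf : f = []
  · simp only [hf, ne_eq, not_true_eq_false, if_false] at hk
    simp [pvScanB] at hk
  · simp only [hf, ne_eq, not_false_eq_true, if_true, List.mem_append,
      List.mem_singleton] at hk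
    rcases hk with hk | hk
    · exact le_of_lt (pvScanB_bound f 0 [] 0 f.length (le_refl 0) (by simp) (by simp) k hk)
    · omega

theorem pvTryB_congr (ks : List Nat) (content low1 low2 : List Char) (s : Int)
    (h : ∀ k ∈ ks, low1.take k = low2.take k) :
    pvTryB content low1 s ks = pvTryB content low2 s ks := by
  induction ks with
  | nil => rfl
  | cons k rest ih =>
    simp only [pvTryB]
    rw [h k (by simp), ih (fun x hx => h x (by simp [hx]))]

theorem pvNextF_prefix (f : List Char) : pvNextF f <+: f := by
  have hr : ∀ l : List Char, PySem.Chars.rstrip l <+: l := by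
    intro l
    obtain ⟨w, hw, -⟩ := pv_rstrip_decomp l
    exact ⟨w, hw.symm⟩
  by_cases hsp : ' ' ∈ f
  · obtain ⟨p, t, hpt, hnt⟩ := pv_split_last_space f hsp
    have hchop : pvChopA f = p ++ [' '] := hpt ▸ pvChopA_last_space p t hnt
    rw [pvNextF, hchop, pv_rstrip_concat_space]
    calc PySem.Chars.rstrip p <+: p := hr p
      _ <+: f := ⟨' ' :: t, hpt.symm⟩
  · rw [pvNextF, pvChopA_nospace f hsp]
    simp [PySem.Chars.rstrip]

-- MAIN: A's loop equals B's candidate loop over B's cut list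
theorem pv_main (n : Nat) : ∀ (f content : List Char) (uname : String) (s : Int),
    f.length ≤ n →
    pvLoopA content uname f s =
      (match pvTryB content (PySem.Chars.lower f) s (pvCutsAll f).reverse with
       | some cand => String.ofList cand
       | none => uname) := by
  induction n with
  | zero =>
    intro f content uname s hn
    have hf : f = [] := List.eq_nil_of_length_eq_zero (Nat.le_zero.mp hn)
    subst hf
    rw [pvLoopA]
    simp [pvCutsAll, pvScanB, pvTryB]
  | succ n ih =>
    intro f content uname s hn
    by_cases hf : f = []
    · subst hf
      rw [pvLoopA]
      simp [pvCutsAll, pvScanB, pvTryB]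
    · have h0 : 0 < f.length := List.length_pos_of_ne_nil hf
      have hcuts : (pvCutsAll f).reverse = f.length :: (pvCutsAll (pvNextF f)).reverse := by
        rw [pvCutsAll]
        simp only [hf, ne_eq, not_false_eq_true, if_true, List.reverse_append,
          List.reverse_cons, List.reverse_nil, List.nil_append, List.singleton_append]
        rw [pv_cuts_step]
      rw [pvLoopA, hcuts]
      simp only [show s + (f.length : Int) > s from by omega, if_true]
      simp only [pvTryB]
      have htake : (PySem.Chars.lower f).take f.length = PySem.Chars.lower f := by
        simp [PySem.Chars.lower]
      rw [htake]
      by_cases heq : PySem.Chars.lower (PySem.List.slice content (some s) (some (s + (f.length : Int)))) = PySem.Chars.lower f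
      · simp [heq]
      · simp only [heq, if_false]
        have hlt : (pvNextF f).length < f.length := pvNextA_lt f hf
        have hcongr : pvTryB content (PySem.Chars.lower f) s (pvCutsAll (pvNextF f)).reverse =
            pvTryB content (PySem.Chars.lower (pvNextF f)) s (pvCutsAll (pvNextF f)).reverse := by
          apply pvTryB_congr
          intro k hk
          have hkle : k ≤ (pvNextF f).length :=
            pvCutsAll_le (pvNextF f) k (List.mem_reverse.mp hk)
          have hpre : pvNextF f = f.take (pvNextF f).length :=
            List.prefix_iff_eq_take.mp (pvNextF_prefix f)
          rw [show PySem.Chars.lower (pvNextF f) = (PySem.Chars.lower f).take (pvNextF f).length from by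
            rw [hpre]; simp [PySem.Chars.lower, List.map_take]]
          rw [List.take_take, min_eq_left hkle]
        rw [hcongr]
        exact ih (pvNextF f) content uname s (by omega)

-- ===== VERDICT (by name: the statement is the Claim_ definition above) =====
theorem find_best_match_in_name_spec : Claim_equal_find_best_match_in_name := by
  intro content uname fullname start_index _
  unfold Spec_find_best_match_in_name find_best_match_in_name find_best_match_in_name_alt
  simp only
  rw [pv_main fullname.toList.length fullname.toList content.toList uname start_index (le_refl _)]
  rw [pvCutsAll]
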